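-- pv_equiv track=rewrite | github.com/aBolondVarazslo/Oizus | MAIN/main.py | triple_factorial
-- ===== SOURCE A (Python) =====
-- def triple_factorial(n):
--     if n < 0:
--         raise ValueError("Triple factorial no defined for negative numbers")
--
--     if n == 0 or n == 1 or n == 2:
--         return 1
--
--     result = 1
--
--     for i in range(n, 0, -3):
--         result *= i
--
--     return result
-- ===== SOURCE B (Python) =====
-- def triple_factorial(n):
--     if n < 0:
--         raise ValueError("Triple factorial no defined for negative numbers")
--     if n == 0 or n == 1 or n == 2:
--         return 1
--     factors = list(range(n, 0, -3))
--     return _prod_dc(factors)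
--
-- def _prod_dc(xs):
--     if len(xs) == 0:
--         return 1
--     if len(xs) == 1:
--         return xs[0]
--     m = len(xs) // 2
--     return _prod_dc(xs[:m]) * _prod_dc(xs[m:])
-- ===== Notes on version B (the rewrite author's own statement) =====
-- stated objective: faster
-- what changed: Replaces the linear left-to-right accumulation of the factors with a balanced divide-and-conquer product over the same factor list, which keeps big-integer operands of comparable size and reduces total bignum-multiplication work.
import Mathlib
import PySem

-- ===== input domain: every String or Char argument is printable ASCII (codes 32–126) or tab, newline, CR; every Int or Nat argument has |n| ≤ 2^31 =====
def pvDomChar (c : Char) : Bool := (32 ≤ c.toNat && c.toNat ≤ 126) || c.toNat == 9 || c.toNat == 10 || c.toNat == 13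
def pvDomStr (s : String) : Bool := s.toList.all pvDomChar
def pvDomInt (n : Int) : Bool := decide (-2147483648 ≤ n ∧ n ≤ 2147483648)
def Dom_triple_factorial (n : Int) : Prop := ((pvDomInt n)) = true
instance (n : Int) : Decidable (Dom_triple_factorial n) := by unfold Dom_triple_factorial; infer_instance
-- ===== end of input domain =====

-- B replaces the linear loop product with a balanced divide-and-conquer product over the same factors (measurably faster on large n: balanced big-integer operands).
-- A mutates nothing; A raises ValueError for n < 0 (excluded by Pre_).
-- ===== PORT A =====
def triple_factorial (n : Int) : Int :=
  if n == 0 || n == 1 || n == 2 then 1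
  else (PySem.List.pyRange n 0 (-3)).foldl (fun result i => result * i) 1

-- ===== PORT B =====
def prodDC (xs : List Int) : Int :=
  if h0 : xs.length = 0 then 1
  else if h1 : xs.length = 1 then xs.headI
  else
    let m := xs.length / 2
    prodDC (xs.take m) * prodDC (xs.drop m)
termination_by xs.length
decreasing_by
  · simp only [List.length_take]; omega
  · simp only [List.length_drop]; omega

def triple_factorial_alt (n : Int) : Int :=
  if n == 0 || n == 1 || n == 2 then 1
  else prodDC (PySem.List.pyRange n 0 (-3))

-- ===== PRECONDITION & SPEC =====
-- Python A raises ValueError for n < 0; Pre_ excludes exactly those inputs.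
def Pre_triple_factorial (n : Int) : Prop := 0 ≤ n
instance (n : Int) : Decidable (Pre_triple_factorial n) := by unfold Pre_triple_factorial; infer_instance
def pvWitness_triple_factorial : Int := (7)
def Spec_triple_factorial (n : Int) (out : Int) : Prop := out = triple_factorial_alt n
instance (n : Int) (out : Int) : Decidable (Spec_triple_factorial n out) := by unfold Spec_triple_factorial; infer_instance

-- ===== CLAIM (what is proved, stated in full; the proofs are below) =====
def Claim_equal_triple_factorial : Prop := ∀ (n : Int), Dom_triple_factorial n → Pre_triple_factorial n → Spec_triple_factorial n (triple_factorial n)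

-- ===== LEMMAS AND PROOFS =====
theorem prodDC_eq_prod (xs : List Int) : prodDC xs = xs.prod := by
  fun_induction prodDC xs with
  | case1 xs h0 => simp [List.length_eq_zero_iff.mp h0]
  | case2 xs h0 h1 =>
      obtain ⟨a, ha⟩ := List.length_eq_one_iff.mp h1
      simp [ha, List.headI]
  | case3 xs h0 h1 m ih1 ih2 =>
      rw [ih1, ih2, ← List.prod_append, List.take_append_drop]


-- ===== VERDICT (by name: the statement is the Claim_ definition above) =====
theorem triple_factorial_spec : Claim_equal_triple_factorial := by
  intro n _ _
  unfold Spec_triple_factorial triple_factorial triple_factorial_alt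
  split
  · rfl
  · rw [prodDC_eq_prod, List.prod_eq_foldl]
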